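-- pv_equiv track=rewrite | github.com/vanesa/interviewcake | find_busiest_period.py | find_busiest_period
-- ===== SOURCE A (Python) =====
-- def find_busiest_period(data):
--
--   max_visitor = 0
--   current_count = 0
--   result = 0 #
--   for i, row in enumerate(data):
--     if row[2] == 1:
--       current_count += row[1]
--     else:
--       current_count -= row[1]
--
--     if i < len(data)-1 and row[0] == data[i+1][0]:
--       continue
--     if current_count > max_visitor:
--       max_visitor = current_count
--       result = row[0]
--
--   return result
-- ===== SOURCE B (Python) =====
-- def find_busiest_period(data):
--     # staged passes: prefix totals, run-boundary candidates, global peak, first argmax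
--     totals = []
--     c = 0
--     for _, num, kind in data:
--         c += num if kind == 1 else -num
--         totals.append(c)
--     is_last = [a[0] != b[0] for a, b in zip(data, data[1:])] + ([True] if data else [])
--     cands = [(tot, row[0]) for row, tot, last in zip(data, totals, is_last) if last]
--     peak = max((tot for tot, _ in cands), default=0)
--     if peak <= 0:
--         return 0
--     return next(t for tot, t in cands if tot == peak)
-- ===== Notes on version B (the rewrite author's own statement) =====
-- stated objective: alternative
-- what changed: Replaced A's single sweep with a running maximum and index lookahead by staged passes: build the prefix-total list, filter the run-end candidates, take the global peak with max(..., default=0), and return the first candidate attaining it (0 if the peak is not positive).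
import Mathlib
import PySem

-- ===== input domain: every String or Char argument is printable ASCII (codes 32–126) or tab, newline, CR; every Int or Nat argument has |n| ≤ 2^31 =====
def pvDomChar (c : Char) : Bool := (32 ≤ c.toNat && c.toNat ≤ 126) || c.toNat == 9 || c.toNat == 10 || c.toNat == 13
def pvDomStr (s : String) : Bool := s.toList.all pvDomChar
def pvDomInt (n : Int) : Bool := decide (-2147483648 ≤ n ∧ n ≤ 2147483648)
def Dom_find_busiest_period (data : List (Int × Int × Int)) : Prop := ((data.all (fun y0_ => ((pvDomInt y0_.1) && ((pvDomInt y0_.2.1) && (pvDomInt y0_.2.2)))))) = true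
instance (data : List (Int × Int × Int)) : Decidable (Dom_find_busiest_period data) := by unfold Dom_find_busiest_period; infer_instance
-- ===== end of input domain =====

-- B replaces A's single sweep (running maximum + index lookahead) by staged passes:
-- prefix totals, run-end candidates, global peak via max, first candidate attaining it.
-- Objective: alternative decomposition, same O(n) cost.

-- ===== PORT A =====
-- A's loop: update count; 'continue' while the next row has the same timestamp, else compare.
def fbpGoA : List (Int × Int × Int) → Int → Int → Int → Int
  | [], _, _, res => res
  | (t, n, e) :: rest, maxv, cnt, res =>
    let cnt' := if e = 1 then cnt + n else cnt - n
    let skip : Bool := match rest with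
      | (t2, _, _) :: _ => t == t2
      | [] => false
    if skip then fbpGoA rest maxv cnt' res
    else if cnt' > maxv then fbpGoA rest cnt' cnt' t
    else fbpGoA rest maxv cnt' res

def find_busiest_period (data : List (Int × Int × Int)) : Int :=
  fbpGoA data 0 0 0

-- ===== PORT B =====
-- first pass of Source B: the list of prefix totals (running signed count after each row)
def fbpTotals : List (Int × Int × Int) → Int → List Int
  | [], _ => []
  | (_, num, kind) :: rest, c =>
    let c' := if kind = 1 then c + num else c - num
    c' :: fbpTotals rest c'

-- is_last = [a[0] != b[0] for a, b in zip(data, data[1:])] + ([True] if data else [])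
def fbpIsLast (data : List (Int × Int × Int)) : List Bool :=
  (data.zip data.tail).map (fun p => p.1.1 != p.2.1) ++ (if data.isEmpty then [] else [true])

-- cands = [(tot, row[0]) for row, tot, last in zip(data, totals, is_last) if last]
def fbpCands (data : List (Int × Int × Int)) : List (Int × Int) :=
  (data.zip ((fbpTotals data 0).zip (fbpIsLast data))).filterMap
    (fun p => if p.2.2 then some (p.2.1, p.1.1) else none)

def find_busiest_period_alt (data : List (Int × Int × Int)) : Int :=
  let cands := fbpCands data
  let peak := (PySem.List.max? (cands.map Prod.fst) (fun x => x)).getD 0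
  if peak ≤ 0 then 0
  -- next(t for tot, t in cands if tot == peak): peak > 0 guarantees a match exists,
  -- so the .getD 0 default is never reached (Python's next would raise only then)
  else ((cands.find? (fun p => p.1 == peak)).map Prod.snd).getD 0

-- ===== PRECONDITION & SPEC =====
def Spec_find_busiest_period (data : List (Int × Int × Int)) (out : Int) : Prop := out = find_busiest_period_alt data
instance (data : List (Int × Int × Int)) (out : Int) : Decidable (Spec_find_busiest_period data out) := by unfold Spec_find_busiest_period; infer_instance

-- ===== CLAIM (what is proved, stated in full; the proofs are below) =====
def Claim_equal_find_busiest_period : Prop := ∀ (data : List (Int × Int × Int)), Dom_find_busiest_period data → Spec_find_busiest_period data (find_busiest_period data)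

-- ===== LEMMAS AND PROOFS =====

-- run-end candidates of data, starting from count c: (total at run end, timestamp)
def fbpCandList : List (Int × Int × Int) → Int → List (Int × Int)
  | [], _ => []
  | (t, n, e) :: rest, c =>
    let c' := if e = 1 then c + n else c - n
    match rest with
    | (t2, _, _) :: _ =>
      if t = t2 then fbpCandList rest c' else (c', t) :: fbpCandList rest c'
    | [] => [(c', t)]

-- A's comparison loop, restricted to the candidate stream
def fbpSweep : List (Int × Int) → Int → Int → Int
  | [], _, res => res
  | (c, t) :: cs, maxv, res =>
    if c > maxv then fbpSweep cs c t else fbpSweep cs maxv res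

theorem fbpGoA_cons (t n e : Int) (rest : List (Int × Int × Int)) (maxv cnt res : Int) :
    fbpGoA ((t, n, e) :: rest) maxv cnt res =
      (let cnt' := if e = 1 then cnt + n else cnt - n
       let skip : Bool := match rest with
         | (t2, _, _) :: _ => t == t2
         | [] => false
       if skip then fbpGoA rest maxv cnt' res
       else if cnt' > maxv then fbpGoA rest cnt' cnt' t
       else fbpGoA rest maxv cnt' res) := rfl

theorem fbpCandList_cons (t n e : Int) (rest : List (Int × Int × Int)) (c : Int) :
    fbpCandList ((t, n, e) :: rest) c =
      (let c' := if e = 1 then c + n else c - n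
       match rest with
       | (t2, _, _) :: _ =>
         if t = t2 then fbpCandList rest c' else (c', t) :: fbpCandList rest c'
       | [] => [(c', t)]) := rfl

-- A's sweep only looks at the run-end candidates
theorem fbpGoA_eq_sweep (data : List (Int × Int × Int)) :
    ∀ maxv cnt res, fbpGoA data maxv cnt res = fbpSweep (fbpCandList data cnt) maxv res := by
  induction data with
  | nil => intro _ _ _; rfl
  | cons x xs ih =>
    intro maxv cnt res
    rcases x with ⟨t, n, e⟩
    rw [fbpGoA_cons, fbpCandList_cons]
    rcases xs with _ | ⟨⟨t2, n2, e2⟩, ys⟩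
    · simp only [fbpSweep, fbpGoA]
      split_ifs <;> simp_all
    · by_cases he : t = t2
      · simp only [he, beq_self_eq_true, if_pos]
        exact ih _ _ _
      · simp only [beq_iff_eq, he, if_false, fbpSweep]
        split_ifs <;> exact ih _ _ _

-- B's staged construction produces exactly the run-end candidates
theorem fbpCands_eq_candList (data : List (Int × Int × Int)) :
    ∀ c, (data.zip ((fbpTotals data c).zip (fbpIsLast data))).filterMap
      (fun p => if p.2.2 then some (p.2.1, p.1.1) else none) = fbpCandList data c := by
  induction data with
  | nil => intro c; rfl
  | cons x xs ih =>
    intro c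
    rcases x with ⟨t, n, e⟩
    rcases xs with _ | ⟨⟨t2, n2, e2⟩, ys⟩
    · rfl
    · have hIs : fbpIsLast ((t, n, e) :: (t2, n2, e2) :: ys)
          = (t != t2) :: fbpIsLast ((t2, n2, e2) :: ys) := rfl
      rw [hIs, fbpCandList_cons]
      show List.filterMap _ (((t, n, e), (_, (t != t2))) :: _) = _
      rw [List.filterMap_cons]
      by_cases he : t = t2
      · simp only [he, bne_self_eq_false, if_pos]
        exact ih _
      · have hb : (t != t2) = true := by simp [he]
        simp only [hb, if_pos]
        simp only [he, if_false]
        exact congrArg _ (ih _)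

theorem fbpCands_eq (data : List (Int × Int × Int)) :
    fbpCands data = fbpCandList data 0 := fbpCands_eq_candList data 0

theorem fbpFoldl_max_init (l : List Int) : ∀ a b : Int, l.foldl max (max a b) = max a (l.foldl max b) := by
  induction l with
  | nil => intro a b; rfl
  | cons c l ih =>
    intro a b
    have h : max (max a b) c = max a (max b c) := by omega
    simp only [List.foldl, h, ih]

theorem fbpFoldl_max_attained (l : List Int) : ∀ m : Int, l.foldl max m = m ∨ l.foldl max m ∈ l := by
  induction l with
  | nil => intro m; exact Or.inl rfl
  | cons c l ih =>
    intro m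
    rcases ih (max m c) with h | h
    · by_cases hcm : c ≤ m
      · rw [List.foldl]; left; rw [h]; omega
      · right; rw [List.foldl, h]
        have hmx : max m c = c := by omega
        rw [hmx]; exact List.mem_cons_self
    · right; right; exact h

-- the sweep returns the timestamp of the first candidate attaining the peak, if it beats maxv
theorem fbpSweep_spec (cs : List (Int × Int)) :
    ∀ m r : Int,
      fbpSweep cs m r =
        (if m < (cs.map Prod.fst).foldl max m
         then ((cs.find? (fun p => p.1 == (cs.map Prod.fst).foldl max m)).map Prod.snd).getD r
         else r) := by
  induction cs with
  | nil => intro m r; simp [fbpSweep]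
  | cons p cs ih =>
    intro m r
    rcases p with ⟨c, t⟩
    simp only [List.map_cons, List.foldl]
    by_cases hc : c > m
    · have hmc : max m c = c := by omega
      rw [hmc]
      have hMc : c ≤ (cs.map Prod.fst).foldl max c := (PySem.List.le_foldl_max _ _).1
      simp only [fbpSweep, if_pos hc, ih c t]
      by_cases hlt : c < (cs.map Prod.fst).foldl max c
      · rw [if_pos hlt, if_pos (by omega : m < (cs.map Prod.fst).foldl max c)]
        rw [List.find?_cons_of_neg (by simp; omega)]
        -- the peak is attained in cs, so find? is some and the default is irrelevant
        rcases fbpFoldl_max_attained (cs.map Prod.fst) c with h | h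
        · omega
        · obtain ⟨q, hq, hq1⟩ := List.mem_map.mp h
          have hsome : (cs.find? (fun p => p.1 == (cs.map Prod.fst).foldl max c)).isSome := by
            rw [List.find?_isSome]
            exact ⟨q, hq, by simp [hq1]⟩
          rcases Option.isSome_iff_exists.mp hsome with ⟨q', hq'⟩
          rw [hq']; rfl
      · have hM : (cs.map Prod.fst).foldl max c = c := by omega
        rw [if_neg hlt, if_pos (by omega : m < (cs.map Prod.fst).foldl max c), hM]
        rw [List.find?_cons_of_pos (by simp)]
        rfl
    · have hmc : max m c = m := by omega
      rw [hmc, fbpSweep, if_neg (by omega : ¬ c > m), ih m r]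
      by_cases hlt : m < (cs.map Prod.fst).foldl max m
      · rw [if_pos hlt, if_pos hlt]
        rw [List.find?_cons_of_neg (by simp; omega)]
      · rw [if_neg hlt, if_neg hlt]

-- ===== VERDICT (by name: the statement is the Claim_ definition above) =====
theorem find_busiest_period_spec : Claim_equal_find_busiest_period := by
  intro data _
  unfold Spec_find_busiest_period find_busiest_period find_busiest_period_alt
  rw [fbpGoA_eq_sweep, fbpSweep_spec]
  show _ =
    (if ((PySem.List.max? ((fbpCands data).map Prod.fst) (fun x => x)).getD 0) ≤ 0 then 0
     else (((fbpCands data).find?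
        (fun p => p.1 == (PySem.List.max? ((fbpCands data).map Prod.fst) (fun x => x)).getD 0)).map
        Prod.snd).getD 0)
  rw [fbpCands_eq]
  rcases h : (fbpCandList data 0).map Prod.fst with _ | ⟨x, l⟩
  · simp [PySem.List.max?]
  · rw [PySem.List.max?_id_cons]
    simp only [Option.getD_some, List.foldl]
    have hx : l.foldl max (max 0 x) = max 0 (l.foldl max x) := fbpFoldl_max_init l 0 x
    rw [hx]
    by_cases hp : l.foldl max x ≤ 0
    · rw [if_neg (by omega), if_pos hp]
    · rw [if_pos (by omega), if_neg hp]
      have hm : max 0 (l.foldl max x) = l.foldl max x := by omega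
      rw [hm]
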